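-- pv_equiv track=rewrite | github.com/vbionic/AS_MRI2Mesh | process_all.py | get_range_of_entries
-- ===== SOURCE A (Python) =====
-- def get_range_of_entries(d, first_key, last_key):
--     result = {}
--     found_first = False
--     for key in d:
--         if key == first_key:
--             found_first = True
--         if found_first:
--             result[key] = d[key]
--         if key == last_key:
--             break
--     return result
-- ===== SOURCE B (Python) =====
-- def get_range_of_entries(d, first_key, last_key):
--     keys = list(d)
--     if last_key in keys:
--         keys = keys[:keys.index(last_key) + 1]
--     if first_key in keys:
--         return {k: d[k] for k in keys[keys.index(first_key):]}
--     return {}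
-- ===== Notes on version B (the rewrite author's own statement) =====
-- stated objective: idiomatic
-- what changed: Replaces the found_first/break state machine with a precomputed key list that is truncated at last_key (inclusive) and sliced from first_key, followed by a dict comprehension. Pre_ only requires distinct keys in the association list, which every Python dict argument satisfies.
import Mathlib
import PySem

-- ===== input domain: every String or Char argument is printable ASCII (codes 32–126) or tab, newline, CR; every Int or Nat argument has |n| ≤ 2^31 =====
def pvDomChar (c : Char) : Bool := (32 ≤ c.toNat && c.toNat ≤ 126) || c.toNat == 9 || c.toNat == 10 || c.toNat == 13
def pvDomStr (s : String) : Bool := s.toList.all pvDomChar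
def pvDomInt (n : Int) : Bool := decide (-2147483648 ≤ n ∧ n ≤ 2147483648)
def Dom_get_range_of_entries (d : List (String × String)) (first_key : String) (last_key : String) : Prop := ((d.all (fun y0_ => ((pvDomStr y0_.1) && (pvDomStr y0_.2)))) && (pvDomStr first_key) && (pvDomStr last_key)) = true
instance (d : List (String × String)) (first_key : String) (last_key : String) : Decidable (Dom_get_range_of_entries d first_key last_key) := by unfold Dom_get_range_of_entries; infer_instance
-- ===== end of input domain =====

-- B replaces A's found_first/break state machine with key-list truncation/slicing and a dict
-- comprehension (idiomatic; same cost). Equivalence is about the returned dict as a pair list.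

-- ===== PORT A =====
-- the loop 'for key in d: …' of A; d[key] is a lookup in the FULL dict (exact: key ∈ d, so getD never hits its default)
def getRangeLoopA (d : List (String × String)) (first_key last_key : String) :
    List (String × String) → Bool → PySem.Dict String String → PySem.Dict String String
  | [], _, result => result
  | (key, _) :: rest, found_first, result =>
      let found_first := if key == first_key then true else found_first
      let result := if found_first then result.insert key ((PySem.Dict.mk d).getD key "") else result
      if key == last_key then result else getRangeLoopA d first_key last_key rest found_first result

def get_range_of_entries (d : List (String × String)) (first_key : String) (last_key : String) : List (String × String) :=
  (getRangeLoopA d first_key last_key d false PySem.Dict.empty).items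

-- ===== PORT B =====
def get_range_of_entries_alt (d : List (String × String)) (first_key : String) (last_key : String) : List (String × String) :=
  let keys := d.map Prod.fst
  let keys := if keys.contains last_key then keys.take (((PySem.List.index? keys last_key).getD 0) + 1) else keys
  if keys.contains first_key then
    (keys.drop ((PySem.List.index? keys first_key).getD 0)).map (fun k => (k, (PySem.Dict.mk d).getD k ""))
  else []

-- ===== PRECONDITION & SPEC =====
-- Pre_ excludes association lists with duplicate keys: they do not represent a Python dict
-- (Python collapses duplicates on construction), so the ports' list-level behaviour there is accidental.
def Pre_get_range_of_entries (d : List (String × String)) (first_key : String) (last_key : String) : Prop :=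
  (d.map Prod.fst).Nodup
instance (d : List (String × String)) (first_key : String) (last_key : String) : Decidable (Pre_get_range_of_entries d first_key last_key) := by unfold Pre_get_range_of_entries; infer_instance

def pvWitness_get_range_of_entries : (List (String × String)) × String × String :=
  ([("a", "1"), ("b", "2"), ("c", "3")], "a", "b")

def Spec_get_range_of_entries (d : List (String × String)) (first_key : String) (last_key : String) (out : List (String × String)) : Prop := out = get_range_of_entries_alt d first_key last_key
instance (d : List (String × String)) (first_key : String) (last_key : String) (out : List (String × String)) : Decidable (Spec_get_range_of_entries d first_key last_key out) := by unfold Spec_get_range_of_entries; infer_instance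

-- ===== CLAIM (what is proved, stated in full; the proofs are below) =====
def Claim_equal_get_range_of_entries : Prop := ∀ (d : List (String × String)) (first_key : String) (last_key : String), Dom_get_range_of_entries d first_key last_key → Pre_get_range_of_entries d first_key last_key → Spec_get_range_of_entries d first_key last_key (get_range_of_entries d first_key last_key)

-- ===== LEMMAS AND PROOFS =====

-- the keys selected by A's state machine, as a pure function of the key list
def selKeys (first_key last_key : String) : List String → Bool → List String
  | [], _ => []
  | k :: t, found =>
      let found' := found || (k == first_key)
      (if found' then [k] else []) ++ (if k == last_key then [] else selKeys first_key last_key t found')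

-- B's truncation step 'keys = keys[:keys.index(last_key)+1] if last_key in keys'
def trunc (last_key : String) (ks : List String) : List String :=
  if ks.contains last_key then ks.take (((PySem.List.index? ks last_key).getD 0) + 1) else ks

-- B's whole key selection
def selB (fk lk : String) (ks : List String) : List String :=
  let keys := trunc lk ks
  if keys.contains fk then keys.drop ((PySem.List.index? keys fk).getD 0) else []

theorem selKeys_true (fk lk : String) (ks : List String) :
    selKeys fk lk ks true = trunc lk ks := by
  induction ks with
  | nil => simp [selKeys, trunc]
  | cons k t ih =>
      by_cases hk : k = lk
      · subst hk
        simp [selKeys, trunc, List.idxOf?_cons]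
      · have hne : (k == lk) = false := by simp [hk]
        by_cases hm : t.contains lk
        · have hsome : (List.idxOf? lk t).isSome := by
            rw [← PySem.List.index?_eq_idxOf?, PySem.List.index?_isSome_iff]; simpa using hm
          obtain ⟨i, hi⟩ := Option.isSome_iff_exists.mp hsome
          have hmem : lk ∈ t := by simpa using hm
          have hsym : ¬ lk = k := fun h => hk h.symm
          simp [selKeys, trunc, List.idxOf?_cons, hne, hmem, hsym, hi, ih, List.take_succ_cons]
        · have hnm : lk ∉ t := by simpa using hm
          have hsym : ¬ lk = k := fun h => hk h.symm
          simp [selKeys, trunc, hne, hnm, hsym, ih]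

theorem trunc_cons (lk k : String) (t : List String) (hk : k ≠ lk) :
    trunc lk (k :: t) = k :: trunc lk t := by
  have hne : (k == lk) = false := by simp [hk]
  by_cases hm : t.contains lk
  · have hsome : (List.idxOf? lk t).isSome := by
      rw [← PySem.List.index?_eq_idxOf?, PySem.List.index?_isSome_iff]; simpa using hm
    obtain ⟨i, hi⟩ := Option.isSome_iff_exists.mp hsome
    have hmem : lk ∈ t := by simpa using hm
    have hsym : ¬ lk = k := fun h => hk h.symm
    simp [trunc, List.idxOf?_cons, hne, hmem, hsym, hi, List.take_succ_cons]
  · have hnm : lk ∉ t := by simpa using hm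
    have hsym : ¬ lk = k := fun h => hk h.symm
    simp [trunc, hnm, hsym]

theorem selB_cons (fk lk k : String) (t : List String) :
    selB fk lk (k :: t) =
      if k = lk then (if k = fk then [k] else [])
      else if k = fk then k :: trunc lk t
      else selB fk lk t := by
  by_cases hklk : k = lk
  · subst hklk
    have htr : trunc k (k :: t) = [k] := by simp [trunc, List.idxOf?_cons]
    by_cases hkfk : k = fk
    · subst hkfk
      simp [selB, htr, List.idxOf?_cons]
    · have hne : (k == fk) = false := by simp [hkfk]
      have hsym : ¬ fk = k := fun h => hkfk h.symm
      simp [selB, htr, hkfk, hsym]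
  · rw [selB]
    simp only [trunc_cons lk k t hklk]
    by_cases hkfk : k = fk
    · subst hkfk
      simp [List.idxOf?_cons, hklk]
    · have hne : (k == fk) = false := by simp [hkfk]
      by_cases hf : (trunc lk t).contains fk
      · have hsome : (List.idxOf? fk (trunc lk t)).isSome := by
          rw [← PySem.List.index?_eq_idxOf?, PySem.List.index?_isSome_iff]; simpa using hf
        obtain ⟨j, hj⟩ := Option.isSome_iff_exists.mp hsome
        have hmem : fk ∈ trunc lk t := by simpa using hf
        have hsym : ¬ fk = k := fun h => hkfk h.symm
        simp [selB, List.idxOf?_cons, hne, hmem, hsym, hj, hklk, hkfk, List.drop_succ_cons]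
      · have hnm : fk ∉ trunc lk t := by simpa using hf
        have hsym : ¬ fk = k := fun h => hkfk h.symm
        simp [selB, hnm, hsym, hklk, hkfk]

theorem selB_eq_selKeys (fk lk : String) (ks : List String) :
    selB fk lk ks = selKeys fk lk ks false := by
  induction ks with
  | nil => simp [selB, selKeys, trunc]
  | cons k t ih =>
      rw [selB_cons]
      by_cases hklk : k = lk
      · subst hklk
        by_cases hkfk : k = fk
        · subst hkfk; simp [selKeys]
        · have hne : (k == fk) = false := by simp [hkfk]
          simp [selKeys, hne, hkfk]
      · have hnel : (k == lk) = false := by simp [hklk]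
        by_cases hkfk : k = fk
        · subst hkfk
          simp [selKeys, hklk, hnel, selKeys_true]
        · have hnef : (k == fk) = false := by simp [hkfk]
          simp [selKeys, hklk, hkfk, hnel, hnef, ih]

-- A's loop appends exactly the selected keys (paired with the full-dict lookup) to the accumulator
theorem loopA_items (d : List (String × String)) (fk lk : String) :
    ∀ (s : List (String × String)) (b : Bool) (res : PySem.Dict String String),
      (s.map Prod.fst).Nodup → (∀ k ∈ s.map Prod.fst, res.contains k = false) →
      (getRangeLoopA d fk lk s b res).items =
        res.items ++ (selKeys fk lk (s.map Prod.fst) b).map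
          (fun k => (k, (PySem.Dict.mk d).getD k "")) := by
  intro s
  induction s with
  | nil => intro b res _ _; simp [getRangeLoopA, selKeys]
  | cons p t ih =>
      intro b res hnd hdisj
      obtain ⟨k, v⟩ := p
      simp only [List.map_cons, List.nodup_cons] at hnd
      have hk_not : res.contains k = false := hdisj k (by simp)
      simp only [getRangeLoopA, List.map_cons, selKeys]
      have hbeq : (if k == fk then true else b) = (b || (k == fk)) := by
        cases b <;> cases h : (k == fk) <;> simp
      rw [hbeq]
      cases hb2 : (b || (k == fk)) with
      | false =>
          simp only [Bool.false_eq_true, if_false]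
          have hd' : ∀ x ∈ t.map Prod.fst, res.contains x = false :=
            fun x hx => hdisj x (by simp [hx])
          by_cases hlk : k = lk
          · have hbl : (k == lk) = true := by simp [hlk]
            simp [hbl]
          · have hbl : (k == lk) = false := by simp [hlk]
            simp only [hbl, Bool.false_eq_true, if_false]
            rw [ih false res hnd.2 hd']
            simp
      | true =>
          simp only [if_true]
          have hitems : (res.insert k ((PySem.Dict.mk d).getD k "")).items =
              res.items ++ [(k, (PySem.Dict.mk d).getD k "")] := by
            rw [PySem.Dict.items_insert]
            simp [hk_not]
          have hd' : ∀ x ∈ t.map Prod.fst,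
              (res.insert k ((PySem.Dict.mk d).getD k "")).contains x = false := by
            intro x hx
            have hxk : (x == k) = false := by
              have : x ≠ k := fun h => hnd.1 (h ▸ hx)
              simp [this]
            rw [PySem.Dict.contains_insert]
            simp [hxk, hdisj x (by simp [hx])]
          by_cases hlk : k = lk
          · have hbl : (k == lk) = true := by simp [hlk]
            simp [hbl, hitems]
          · have hbl : (k == lk) = false := by simp [hlk]
            simp only [hbl, Bool.false_eq_true, if_false]
            rw [ih true _ hnd.2 hd', hitems]
            simp

theorem get_range_eq (d : List (String × String)) (fk lk : String)
    (h : (d.map Prod.fst).Nodup) :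
    get_range_of_entries d fk lk = get_range_of_entries_alt d fk lk := by
  have hA : get_range_of_entries d fk lk =
      (selKeys fk lk (d.map Prod.fst) false).map (fun k => (k, (PySem.Dict.mk d).getD k "")) := by
    rw [get_range_of_entries]
    rw [loopA_items d fk lk d false PySem.Dict.empty h (by intro k _; simp [PySem.Dict.contains_empty])]
    simp [PySem.Dict.empty]
  have hB : get_range_of_entries_alt d fk lk =
      (selB fk lk (d.map Prod.fst)).map (fun k => (k, (PySem.Dict.mk d).getD k "")) := by
    simp only [get_range_of_entries_alt, selB, trunc,
      apply_ite (List.map (fun k : String => (k, (PySem.Dict.mk d).getD k "")))]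
    simp
  rw [hA, hB, selB_eq_selKeys]

-- ===== VERDICT (by name: the statement is the Claim_ definition above) =====
theorem get_range_of_entries_spec : Claim_equal_get_range_of_entries := by
  intro d fk lk _ hpre
  unfold Spec_get_range_of_entries
  exact get_range_eq d fk lk hpre
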